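-- pv_equiv track=rewrite | github.com/joony74/atoll_project | app/chat/study_fast_reply.py | _next_compose_pair
-- ===== SOURCE A (Python) =====
-- def _next_compose_pair(first: int, second: int) -> tuple[int, int]:
--     candidates = [(8, 7), (9, 5), (7, 6), (8, 6), (6, 7), (9, 4), (7, 5), (6, 8), (9, 8), (8, 9), (9, 7), (7, 8)]
--     start = (first * 3 + second) % len(candidates)
--     ordered = candidates[start:] + candidates[:start]
--     for candidate in ordered:
--         if candidate != (first, second) and sum(candidate) > 10:
--             return candidate
--     return 8, 7
-- ===== SOURCE B (Python) =====
-- def _next_compose_pair(first: int, second: int) -> tuple[int, int]: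
--     # Every candidate sums to > 10 and all pairs are distinct, so the rotated
--     # scan always stops at the first candidate different from (first, second):
--     # either the one at the rotation offset, or the next one after it.
--     candidates = [(8, 7), (9, 5), (7, 6), (8, 6), (6, 7), (9, 4), (7, 5), (6, 8), (9, 8), (8, 9), (9, 7), (7, 8)]
--     start = (first * 3 + second) % 12
--     c = candidates[start]
--     if c != (first, second):
--         return c
--     return candidates[(start + 1) % 12]
-- ===== Notes on version B (the rewrite author's own statement) =====
-- stated objective: simpler
-- what changed: Replaces the rotated-list construction (two slices + concatenation) and the linear scan with two direct indexed lookups and one conditional, justified by the facts that every candidate sums to more than 10 and all candidate pairs are distinct.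
import Mathlib
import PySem

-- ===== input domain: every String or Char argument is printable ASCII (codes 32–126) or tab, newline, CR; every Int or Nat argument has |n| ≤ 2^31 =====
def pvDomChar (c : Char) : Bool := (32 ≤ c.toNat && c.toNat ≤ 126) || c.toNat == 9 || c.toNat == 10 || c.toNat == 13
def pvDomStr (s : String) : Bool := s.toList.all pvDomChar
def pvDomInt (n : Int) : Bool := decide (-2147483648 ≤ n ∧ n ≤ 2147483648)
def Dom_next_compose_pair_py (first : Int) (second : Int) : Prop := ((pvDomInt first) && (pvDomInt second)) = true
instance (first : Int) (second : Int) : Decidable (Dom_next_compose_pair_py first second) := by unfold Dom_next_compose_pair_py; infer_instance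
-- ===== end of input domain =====

-- B replaces A's rotated-list construction + linear scan by two direct lookups and one
-- conditional (objective: simpler), relying on all candidates summing > 10 and being distinct.

-- ===== PORT A =====
-- the candidates literal (shared verbatim by both Python versions)
def pvCands : List (Int × Int) :=
  [(8, 7), (9, 5), (7, 6), (8, 6), (6, 7), (9, 4), (7, 5), (6, 8), (9, 8), (8, 9), (9, 7), (7, 8)]

-- the 'for candidate in ordered: …' loop of A, with its fallback 'return 8, 7'
def pvLoopA (first : Int) (second : Int) : List (Int × Int) → Int × Int
  | [] => (8, 7)
  | c :: rest => if c ≠ (first, second) ∧ c.1 + c.2 > 10 then c else pvLoopA first second rest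

def next_compose_pair_py (first : Int) (second : Int) : Int × Int :=
  let candidates := pvCands
  let start := PySem.Int.mod (first * 3 + second) (candidates.length : Int)
  let ordered := PySem.List.slice candidates (some start) none ++ PySem.List.slice candidates none (some start)
  pvLoopA first second ordered

-- ===== PORT B =====
def next_compose_pair_py_alt (first : Int) (second : Int) : Int × Int :=
  let candidates := pvCands
  let start := PySem.Int.mod (first * 3 + second) 12
  -- start is a Python-mod residue in [0, 12), so both indexings are in range; default unreachable
  let c := PySem.List.pyGetD candidates start (0, 0)
  if c ≠ (first, second) then c
  else PySem.List.pyGetD candidates (PySem.Int.mod (start + 1) 12) (0, 0)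

-- ===== PRECONDITION & SPEC =====
def Spec_next_compose_pair_py (first : Int) (second : Int) (out : Int × Int) : Prop := out = next_compose_pair_py_alt first second
instance (first : Int) (second : Int) (out : Int × Int) : Decidable (Spec_next_compose_pair_py first second out) := by unfold Spec_next_compose_pair_py; infer_instance

-- ===== CLAIM (what is proved, stated in full; the proofs are below) =====
def Claim_equal_next_compose_pair_py : Prop := ∀ (first : Int) (second : Int), Dom_next_compose_pair_py first second → Spec_next_compose_pair_py first second (next_compose_pair_py first second)

-- ===== LEMMAS AND PROOFS =====

theorem pv_mod12_eq_emod (a : Int) : PySem.Int.mod a 12 = a % 12 :=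
  PySem.Int.mod_eq_emod_of_pos (by norm_num)

-- A's scan on a list whose first two elements sum > 10 and differ stops at one of them
theorem pv_loop2 (f s : Int) (c0 c1 : Int × Int) (rest : List (Int × Int))
    (h0 : c0.1 + c0.2 > 10) (h1 : c1.1 + c1.2 > 10) (hne : c0 ≠ c1) :
    pvLoopA f s (c0 :: c1 :: rest) = if c0 ≠ (f, s) then c0 else c1 := by
  simp only [pvLoopA]
  by_cases h : c0 = (f, s)
  · subst h
    simp [hne.symm, h1]
  · simp [h, h0]

-- the whole equivalence, for an arbitrary residue r in [0, 12)
theorem pv_key (first second r : Int) (h0 : 0 ≤ r) (h12 : r < 12) :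
    pvLoopA first second
      (PySem.List.slice pvCands (some r) none ++ PySem.List.slice pvCands none (some r)) =
    (if PySem.List.pyGetD pvCands r (0, 0) ≠ (first, second) then PySem.List.pyGetD pvCands r (0, 0)
     else PySem.List.pyGetD pvCands (PySem.Int.mod (r + 1) 12) (0, 0)) := by
  interval_cases r
  · rw [show (PySem.List.slice pvCands (some (0:Int)) none ++ PySem.List.slice pvCands none (some (0:Int))) = [((8:Int), (7:Int)), ((9:Int), (5:Int)), ((7:Int), (6:Int)), ((8:Int), (6:Int)), ((6:Int), (7:Int)), ((9:Int), (4:Int)), ((7:Int), (5:Int)), ((6:Int), (8:Int)), ((9:Int), (8:Int)), ((8:Int), (9:Int)), ((9:Int), (7:Int)), ((7:Int), (8:Int))] from by decide,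
        show PySem.List.pyGetD pvCands (0:Int) (0, 0) = ((8:Int), (7:Int)) from by decide,
        show PySem.List.pyGetD pvCands (PySem.Int.mod ((0:Int) + 1) 12) (0, 0) = ((9:Int), (5:Int)) from by decide,
        pv_loop2 first second _ _ _ (by norm_num) (by norm_num) (by decide)]
  · rw [show (PySem.List.slice pvCands (some (1:Int)) none ++ PySem.List.slice pvCands none (some (1:Int))) = [((9:Int), (5:Int)), ((7:Int), (6:Int)), ((8:Int), (6:Int)), ((6:Int), (7:Int)), ((9:Int), (4:Int)), ((7:Int), (5:Int)), ((6:Int), (8:Int)), ((9:Int), (8:Int)), ((8:Int), (9:Int)), ((9:Int), (7:Int)), ((7:Int), (8:Int)), ((8:Int), (7:Int))] from by decide,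
        show PySem.List.pyGetD pvCands (1:Int) (0, 0) = ((9:Int), (5:Int)) from by decide,
        show PySem.List.pyGetD pvCands (PySem.Int.mod ((1:Int) + 1) 12) (0, 0) = ((7:Int), (6:Int)) from by decide,
        pv_loop2 first second _ _ _ (by norm_num) (by norm_num) (by decide)]
  · rw [show (PySem.List.slice pvCands (some (2:Int)) none ++ PySem.List.slice pvCands none (some (2:Int))) = [((7:Int), (6:Int)), ((8:Int), (6:Int)), ((6:Int), (7:Int)), ((9:Int), (4:Int)), ((7:Int), (5:Int)), ((6:Int), (8:Int)), ((9:Int), (8:Int)), ((8:Int), (9:Int)), ((9:Int), (7:Int)), ((7:Int), (8:Int)), ((8:Int), (7:Int)), ((9:Int), (5:Int))] from by decide,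
        show PySem.List.pyGetD pvCands (2:Int) (0, 0) = ((7:Int), (6:Int)) from by decide,
        show PySem.List.pyGetD pvCands (PySem.Int.mod ((2:Int) + 1) 12) (0, 0) = ((8:Int), (6:Int)) from by decide,
        pv_loop2 first second _ _ _ (by norm_num) (by norm_num) (by decide)]
  · rw [show (PySem.List.slice pvCands (some (3:Int)) none ++ PySem.List.slice pvCands none (some (3:Int))) = [((8:Int), (6:Int)), ((6:Int), (7:Int)), ((9:Int), (4:Int)), ((7:Int), (5:Int)), ((6:Int), (8:Int)), ((9:Int), (8:Int)), ((8:Int), (9:Int)), ((9:Int), (7:Int)), ((7:Int), (8:Int)), ((8:Int), (7:Int)), ((9:Int), (5:Int)), ((7:Int), (6:Int))] from by decide,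
        show PySem.List.pyGetD pvCands (3:Int) (0, 0) = ((8:Int), (6:Int)) from by decide,
        show PySem.List.pyGetD pvCands (PySem.Int.mod ((3:Int) + 1) 12) (0, 0) = ((6:Int), (7:Int)) from by decide,
        pv_loop2 first second _ _ _ (by norm_num) (by norm_num) (by decide)]
  · rw [show (PySem.List.slice pvCands (some (4:Int)) none ++ PySem.List.slice pvCands none (some (4:Int))) = [((6:Int), (7:Int)), ((9:Int), (4:Int)), ((7:Int), (5:Int)), ((6:Int), (8:Int)), ((9:Int), (8:Int)), ((8:Int), (9:Int)), ((9:Int), (7:Int)), ((7:Int), (8:Int)), ((8:Int), (7:Int)), ((9:Int), (5:Int)), ((7:Int), (6:Int)), ((8:Int), (6:Int))] from by decide,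
        show PySem.List.pyGetD pvCands (4:Int) (0, 0) = ((6:Int), (7:Int)) from by decide,
        show PySem.List.pyGetD pvCands (PySem.Int.mod ((4:Int) + 1) 12) (0, 0) = ((9:Int), (4:Int)) from by decide,
        pv_loop2 first second _ _ _ (by norm_num) (by norm_num) (by decide)]
  · rw [show (PySem.List.slice pvCands (some (5:Int)) none ++ PySem.List.slice pvCands none (some (5:Int))) = [((9:Int), (4:Int)), ((7:Int), (5:Int)), ((6:Int), (8:Int)), ((9:Int), (8:Int)), ((8:Int), (9:Int)), ((9:Int), (7:Int)), ((7:Int), (8:Int)), ((8:Int), (7:Int)), ((9:Int), (5:Int)), ((7:Int), (6:Int)), ((8:Int), (6:Int)), ((6:Int), (7:Int))] from by decide,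
        show PySem.List.pyGetD pvCands (5:Int) (0, 0) = ((9:Int), (4:Int)) from by decide,
        show PySem.List.pyGetD pvCands (PySem.Int.mod ((5:Int) + 1) 12) (0, 0) = ((7:Int), (5:Int)) from by decide,
        pv_loop2 first second _ _ _ (by norm_num) (by norm_num) (by decide)]
  · rw [show (PySem.List.slice pvCands (some (6:Int)) none ++ PySem.List.slice pvCands none (some (6:Int))) = [((7:Int), (5:Int)), ((6:Int), (8:Int)), ((9:Int), (8:Int)), ((8:Int), (9:Int)), ((9:Int), (7:Int)), ((7:Int), (8:Int)), ((8:Int), (7:Int)), ((9:Int), (5:Int)), ((7:Int), (6:Int)), ((8:Int), (6:Int)), ((6:Int), (7:Int)), ((9:Int), (4:Int))] from by decide,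
        show PySem.List.pyGetD pvCands (6:Int) (0, 0) = ((7:Int), (5:Int)) from by decide,
        show PySem.List.pyGetD pvCands (PySem.Int.mod ((6:Int) + 1) 12) (0, 0) = ((6:Int), (8:Int)) from by decide,
        pv_loop2 first second _ _ _ (by norm_num) (by norm_num) (by decide)]
  · rw [show (PySem.List.slice pvCands (some (7:Int)) none ++ PySem.List.slice pvCands none (some (7:Int))) = [((6:Int), (8:Int)), ((9:Int), (8:Int)), ((8:Int), (9:Int)), ((9:Int), (7:Int)), ((7:Int), (8:Int)), ((8:Int), (7:Int)), ((9:Int), (5:Int)), ((7:Int), (6:Int)), ((8:Int), (6:Int)), ((6:Int), (7:Int)), ((9:Int), (4:Int)), ((7:Int), (5:Int))] from by decide,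
        show PySem.List.pyGetD pvCands (7:Int) (0, 0) = ((6:Int), (8:Int)) from by decide,
        show PySem.List.pyGetD pvCands (PySem.Int.mod ((7:Int) + 1) 12) (0, 0) = ((9:Int), (8:Int)) from by decide,
        pv_loop2 first second _ _ _ (by norm_num) (by norm_num) (by decide)]
  · rw [show (PySem.List.slice pvCands (some (8:Int)) none ++ PySem.List.slice pvCands none (some (8:Int))) = [((9:Int), (8:Int)), ((8:Int), (9:Int)), ((9:Int), (7:Int)), ((7:Int), (8:Int)), ((8:Int), (7:Int)), ((9:Int), (5:Int)), ((7:Int), (6:Int)), ((8:Int), (6:Int)), ((6:Int), (7:Int)), ((9:Int), (4:Int)), ((7:Int), (5:Int)), ((6:Int), (8:Int))] from by decide,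
        show PySem.List.pyGetD pvCands (8:Int) (0, 0) = ((9:Int), (8:Int)) from by decide,
        show PySem.List.pyGetD pvCands (PySem.Int.mod ((8:Int) + 1) 12) (0, 0) = ((8:Int), (9:Int)) from by decide,
        pv_loop2 first second _ _ _ (by norm_num) (by norm_num) (by decide)]
  · rw [show (PySem.List.slice pvCands (some (9:Int)) none ++ PySem.List.slice pvCands none (some (9:Int))) = [((8:Int), (9:Int)), ((9:Int), (7:Int)), ((7:Int), (8:Int)), ((8:Int), (7:Int)), ((9:Int), (5:Int)), ((7:Int), (6:Int)), ((8:Int), (6:Int)), ((6:Int), (7:Int)), ((9:Int), (4:Int)), ((7:Int), (5:Int)), ((6:Int), (8:Int)), ((9:Int), (8:Int))] from by decide,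
        show PySem.List.pyGetD pvCands (9:Int) (0, 0) = ((8:Int), (9:Int)) from by decide,
        show PySem.List.pyGetD pvCands (PySem.Int.mod ((9:Int) + 1) 12) (0, 0) = ((9:Int), (7:Int)) from by decide,
        pv_loop2 first second _ _ _ (by norm_num) (by norm_num) (by decide)]
  · rw [show (PySem.List.slice pvCands (some (10:Int)) none ++ PySem.List.slice pvCands none (some (10:Int))) = [((9:Int), (7:Int)), ((7:Int), (8:Int)), ((8:Int), (7:Int)), ((9:Int), (5:Int)), ((7:Int), (6:Int)), ((8:Int), (6:Int)), ((6:Int), (7:Int)), ((9:Int), (4:Int)), ((7:Int), (5:Int)), ((6:Int), (8:Int)), ((9:Int), (8:Int)), ((8:Int), (9:Int))] from by decide,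
        show PySem.List.pyGetD pvCands (10:Int) (0, 0) = ((9:Int), (7:Int)) from by decide,
        show PySem.List.pyGetD pvCands (PySem.Int.mod ((10:Int) + 1) 12) (0, 0) = ((7:Int), (8:Int)) from by decide,
        pv_loop2 first second _ _ _ (by norm_num) (by norm_num) (by decide)]
  · rw [show (PySem.List.slice pvCands (some (11:Int)) none ++ PySem.List.slice pvCands none (some (11:Int))) = [((7:Int), (8:Int)), ((8:Int), (7:Int)), ((9:Int), (5:Int)), ((7:Int), (6:Int)), ((8:Int), (6:Int)), ((6:Int), (7:Int)), ((9:Int), (4:Int)), ((7:Int), (5:Int)), ((6:Int), (8:Int)), ((9:Int), (8:Int)), ((8:Int), (9:Int)), ((9:Int), (7:Int))] from by decide,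
        show PySem.List.pyGetD pvCands (11:Int) (0, 0) = ((7:Int), (8:Int)) from by decide,
        show PySem.List.pyGetD pvCands (PySem.Int.mod ((11:Int) + 1) 12) (0, 0) = ((8:Int), (7:Int)) from by decide,
        pv_loop2 first second _ _ _ (by norm_num) (by norm_num) (by decide)]

-- ===== VERDICT (by name: the statement is the Claim_ definition above) =====
theorem next_compose_pair_py_spec : Claim_equal_next_compose_pair_py := by
  intro first second _
  unfold Spec_next_compose_pair_py next_compose_pair_py next_compose_pair_py_alt
  have hlen : ((pvCands.length : Nat) : Int) = 12 := by decide
  simp only [hlen]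
  exact pv_key first second _ (by rw [pv_mod12_eq_emod]; exact Int.emod_nonneg _ (by norm_num))
    (by rw [pv_mod12_eq_emod]; exact Int.emod_lt_of_pos _ (by norm_num))
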